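-- pv_equiv track=rewrite | github.com/Hamza-Embedded/Audio_Seperation_using_FASTICA | Audio_Seperation_FASTICA_ServerSide.py | select_best_transcription
-- ===== SOURCE A (Python) =====
-- def select_best_transcription(transcriptions):
--     """
--     Select the best transcription based on:
--     1. Length (longer is often better)
--     2. Word count
--     3. Confidence (presence of actual words vs empty/noise)
--     """
--     best_text = ""
--     best_score = 0
--     best_speaker = -1
--
--     for i, text in enumerate(transcriptions):
--         if not text or len(text.strip()) == 0:
--             continue
--
--         # Calculate quality score
--         word_count = len(text.split())
--         char_count = len(text.strip())
--
--         # Score based on length and word count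
--         score = word_count * 2 + char_count
--
--         # Bonus for having punctuation (indicates better structure)
--         if any(p in text for p in ['.', '?', '!']):
--             score += 10
--
--         if score > best_score:
--             best_score = score
--             best_text = text
--             best_speaker = i + 1
--
--     return best_text, best_speaker
-- ===== SOURCE B (Python) =====
-- def select_best_transcription(transcriptions):
--     # Stage 1: collect scored candidates (score, text, speaker).
--     candidates = []
--     for i, text in enumerate(transcriptions):
--         if not text or len(text.strip()) == 0:
--             continue
--         score = len(text.split()) * 2 + len(text.strip())
--         if '.' in text or '?' in text or '!' in text:
--             score += 10
--         candidates.append((score, text, i + 1))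
--     # Stage 2: stable sort, highest score first; stability keeps the
--     # earliest entry first among equal scores (A's first-wins rule).
--     candidates.sort(key=lambda c: -c[0])
--     if not candidates:
--         return "", -1
--     _, text, speaker = candidates[0]
--     return text, speaker
-- ===== Notes on version B (the rewrite author's own statement) =====
-- stated objective: alternative
-- what changed: Replaces A's running best_text/best_score/best_speaker accumulator by two stages: build a list of scored (score, text, speaker) candidates, then stable-sort it by descending score and take the head (stability preserves A's first-wins tie-breaking).
import Mathlib
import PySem

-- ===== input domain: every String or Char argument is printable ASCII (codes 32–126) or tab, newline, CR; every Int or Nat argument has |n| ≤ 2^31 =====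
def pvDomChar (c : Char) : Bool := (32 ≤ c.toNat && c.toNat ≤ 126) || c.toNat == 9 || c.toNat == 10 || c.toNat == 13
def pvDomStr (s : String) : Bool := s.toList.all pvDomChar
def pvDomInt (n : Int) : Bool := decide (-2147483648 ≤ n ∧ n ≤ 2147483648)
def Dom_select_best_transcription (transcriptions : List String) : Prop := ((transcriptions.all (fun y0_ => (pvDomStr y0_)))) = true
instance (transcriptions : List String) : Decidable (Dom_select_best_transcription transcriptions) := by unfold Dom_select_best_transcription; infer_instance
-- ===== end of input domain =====

-- B replaces A's running best-tracking loop by two stages: collect scored candidates,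
-- stable-sort them by descending score, take the head; objective: alternative (same cost class).

-- ===== PORT A =====
-- loop body of A's for-loop, over the state (best_text, best_score, best_speaker)
def pvStepA (st : String × Int × Int) (p : Int × String) : String × Int × Int :=
  let i := p.1
  let text := p.2
  if text == "" || PySem.Str.len (PySem.Str.strip text) == 0 then st
  else
    let word_count : Int := (PySem.Str.split₀ text).length
    let char_count : Int := PySem.Str.len (PySem.Str.strip text)
    let score := word_count * 2 + char_count
    let score := if ["." , "?", "!"].any (fun q => PySem.Str.isIn q text) then score + 10 else score
    if st.2.1 < score then (text, score, i + 1) else st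

def select_best_transcription (transcriptions : List String) : String × Int :=
  let r := (PySem.List.enumerate transcriptions).foldl pvStepA ("", 0, -1)
  (r.1, r.2.2)

-- ===== PORT B =====
-- body of B's candidate-collecting loop: append (score, text, speaker) for non-blank entries
def pvCandStep (acc : List (Int × String × Int)) (p : Int × String) : List (Int × String × Int) :=
  let i := p.1
  let text := p.2
  if text == "" || PySem.Str.len (PySem.Str.strip text) == 0 then acc
  else
    let score : Int := (PySem.Str.split₀ text).length * 2 + PySem.Str.len (PySem.Str.strip text)
    let score := if PySem.Str.isIn "." text || PySem.Str.isIn "?" text || PySem.Str.isIn "!" text then score + 10 else score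
    acc ++ [(score, text, i + 1)]

def select_best_transcription_alt (transcriptions : List String) : String × Int :=
  let candidates := (PySem.List.enumerate transcriptions).foldl pvCandStep []
  let sortedC := PySem.List.sorted candidates (fun c => -c.1)   -- candidates.sort(key=lambda c: -c[0]), stable
  match sortedC with
  | [] => ("", -1)
  | c :: _ => (c.2.1, c.2.2)

-- ===== PRECONDITION & SPEC =====
def Spec_select_best_transcription (transcriptions : List String) (out : String × Int) : Prop := out = select_best_transcription_alt transcriptions
instance (transcriptions : List String) (out : String × Int) : Decidable (Spec_select_best_transcription transcriptions out) := by unfold Spec_select_best_transcription; infer_instance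

-- ===== CLAIM (what is proved, stated in full; the proofs are below) =====
def Claim_equal_select_best_transcription : Prop := ∀ (transcriptions : List String), Dom_select_best_transcription transcriptions → Spec_select_best_transcription transcriptions (select_best_transcription transcriptions)

-- ===== LEMMAS AND PROOFS =====

-- the blank-entry guard and the quality score, as used by both loop bodies
def pvGuard (t : String) : Bool := t == "" || PySem.Str.len (PySem.Str.strip t) == 0
def pvSc (t : String) : Int :=
  let s : Int := (PySem.Str.split₀ t).length * 2 + PySem.Str.len (PySem.Str.strip t)
  if PySem.Str.isIn "." t || PySem.Str.isIn "?" t || PySem.Str.isIn "!" t then s + 10 else s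

-- the binary "keep the better, earlier wins ties" combiner (A's comparison)
def pvStepF (b c : Int × String × Int) : Int × String × Int := if b.1 < c.1 then c else b

-- pure recursive candidate list, speaker numbers from i0 + 1
def pvCandsRec : List String → Int → List (Int × String × Int)
  | [], _ => []
  | t :: rest, i =>
    (if pvGuard t then [] else [(pvSc t, t, i + 1)]) ++ pvCandsRec rest (i + 1)

theorem pvStepA_eq (st : String × Int × Int) (i : Int) (t : String) :
    pvStepA st (i, t) =
      if pvGuard t then st
      else if st.2.1 < pvSc t then (t, pvSc t, i + 1) else st := by
  unfold pvStepA pvGuard pvSc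
  simp [List.any, or_assoc]

theorem pvCandStep_eq (acc : List (Int × String × Int)) (i : Int) (t : String) :
    pvCandStep acc (i, t) = acc ++ (if pvGuard t then [] else [(pvSc t, t, i + 1)]) := by
  unfold pvCandStep pvGuard pvSc
  by_cases h : (t == "" || PySem.Str.len (PySem.Str.strip t) == 0) = true
  · rw [if_pos h, if_pos h, List.append_nil]
  · rw [if_neg h, if_neg h]

theorem pvCands_foldl (ts : List String) (i0 : Int) (acc : List (Int × String × Int)) :
    (PySem.List.enumerate ts i0).foldl pvCandStep acc = acc ++ pvCandsRec ts i0 := by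
  induction ts generalizing i0 acc with
  | nil => simp [PySem.List.enumerate, pvCandsRec]
  | cons t rest ih =>
    rw [PySem.List.enumerate_cons, List.foldl_cons, pvCandStep_eq, ih, pvCandsRec,
      List.append_assoc]

theorem pvSc_pos (t : String) (h : pvGuard t = false) : 0 < pvSc t := by
  unfold pvGuard at h
  unfold pvSc
  simp only [Bool.or_eq_false_iff, beq_eq_false_iff_ne] at h
  have h2 : 0 < PySem.Str.len (PySem.Str.strip t) := by
    have := h.2
    rw [PySem.Str.len_eq] at *
    omega
  have h1 : (0 : Int) ≤ ((PySem.Str.split₀ t).length : Int) := by positivity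
  dsimp only
  split_ifs <;> omega

theorem pvCandsRec_pos (ts : List String) (i0 : Int) (c : Int × String × Int)
    (hc : c ∈ pvCandsRec ts i0) : 0 < c.1 := by
  induction ts generalizing i0 with
  | nil => simp [pvCandsRec] at hc
  | cons t rest ih =>
    unfold pvCandsRec at hc
    rcases List.mem_append.1 hc with h | h
    · by_cases hg : pvGuard t
      · simp [hg] at h
      · simp [hg] at h
        subst h
        exact pvSc_pos t (by simpa using hg)
    · exact ih (i0 + 1) h

-- A's loop over the raw list equals the first-max fold over the candidate list
theorem pvRunA (ts : List String) (i0 : Int) (b : Int × String × Int) :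
    (PySem.List.enumerate ts i0).foldl pvStepA (b.2.1, b.1, b.2.2) =
      (let r := (pvCandsRec ts i0).foldl pvStepF b; (r.2.1, r.1, r.2.2)) := by
  induction ts generalizing i0 b with
  | nil => simp [PySem.List.enumerate, pvCandsRec]
  | cons t rest ih =>
    rw [PySem.List.enumerate_cons, List.foldl_cons, pvStepA_eq]
    unfold pvCandsRec
    by_cases hg : pvGuard t
    · simp only [hg, if_true, List.nil_append]
      exact ih (i0 + 1) b
    · simp only [hg, Bool.false_eq_true, if_false, List.singleton_append, List.foldl_cons]
      unfold pvStepF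
      by_cases hc : b.1 < pvSc t
      · simp only [hc, if_true]
        exact ih (i0 + 1) (pvSc t, t, i0 + 1)
      · simp only [hc, if_false]
        exact ih (i0 + 1) b

-- head of B's stable insertion sort: inserting x keeps/takes the head by the same comparison
theorem pvInsert_head (bf : (Int × String × Int) → (Int × String × Int) → Bool)
    (x : Int × String × Int) (acc : List (Int × String × Int)) :
    (PySem.List.insertBy bf x acc).head? =
      some (match acc.head? with | none => x | some h => if bf x h then x else h) := by
  cases acc with
  | nil => simp [PySem.List.insertBy]
  | cons h t =>
    unfold PySem.List.insertBy
    by_cases hb : bf x h <;> simp [hb]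

theorem pvSortFold_head (cs : List (Int × String × Int)) :
    ∀ (acc : List (Int × String × Int)) (b : Int × String × Int), acc.head? = some b →
    (cs.foldl (fun acc x => PySem.List.insertBy (fun a c => decide ((fun c => -c.1) a < (fun c => -c.1) c)) x acc) acc).head? =
      some (cs.foldl pvStepF b) := by
  induction cs with
  | nil => intro acc b hb; simpa using hb
  | cons x rest ih =>
    intro acc b hb
    rw [List.foldl_cons, List.foldl_cons]
    apply ih
    rw [pvInsert_head, hb]
    unfold pvStepF
    simp only []
    have : (decide (-x.1 < -b.1)) = decide (b.1 < x.1) := by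
      simp [neg_lt_neg_iff]
    rw [this]
    by_cases h : b.1 < x.1 <;> simp [h]

-- ===== VERDICT (by name: the statement is the Claim_ definition above) =====
theorem select_best_transcription_spec : Claim_equal_select_best_transcription := by
  unfold Claim_equal_select_best_transcription
  intro ts _
  unfold Spec_select_best_transcription select_best_transcription select_best_transcription_alt
  rw [pvCands_foldl ts 0 [], List.nil_append]
  rw [show (("" : String), (0 : Int), (-1 : Int)) = (((0:Int), ("":String), (-1:Int)).2.1, ((0:Int), ("":String), (-1:Int)).1, ((0:Int), ("":String), (-1:Int)).2.2) from rfl]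
  rw [pvRunA ts 0 (0, "", -1)]
  cases hcs : pvCandsRec ts 0 with
  | nil =>
    have hs : PySem.List.sorted ([] : List (Int × String × Int)) (fun c => -c.1) = [] := by
      simp [PySem.List.sorted_eq_nil_iff]
    simp [hs]
  | cons c cs =>
    have hpos : 0 < c.1 := pvCandsRec_pos ts 0 c (hcs ▸ List.mem_cons_self)
    have hhead : (PySem.List.sorted (c :: cs) (fun c => -c.1)).head? = some (cs.foldl pvStepF c) := by
      rw [PySem.List.sorted_eq_foldl_insertBy, List.foldl_cons]
      exact pvSortFold_head cs (PySem.List.insertBy _ c []) c (by simp [PySem.List.insertBy])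
    have hfirst : pvStepF (0, "", -1) c = c := by unfold pvStepF; simp [hpos]
    rw [List.foldl_cons, hfirst]
    cases hsl : PySem.List.sorted (c :: cs) (fun c => -c.1) with
    | nil => rw [hsl] at hhead; simp at hhead
    | cons m t =>
      rw [hsl] at hhead
      simp only [List.head?_cons, Option.some.injEq] at hhead
      subst hhead
      simp only [hsl]
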